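-- pv_equiv track=rewrite | github.com/micah-kim/gimme-job-tool | backend/app/services/auto_apply.py | _best_option_match
-- ===== SOURCE A (Python) =====
-- def _best_option_match(answer: str, options: list[str]) -> str | None:
--     """Find the best matching option for a profile answer. Returns option value or None."""
--     if not answer or not options:
--         return None
--     answer_lower = answer.lower().strip()
--
--     # Exact match
--     for opt_text, opt_value in options:
--         if answer_lower == opt_text.lower().strip():
--             return opt_value
--
--     # Substring match (answer contained in option or vice versa)
--     for opt_text, opt_value in options:
--         opt_lower = opt_text.lower().strip()
--         if answer_lower in opt_lower or opt_lower in answer_lower: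
--             return opt_value
--
--     # Keyword match for Yes/No answers
--     if answer_lower in ("yes", "no"):
--         for opt_text, opt_value in options:
--             opt_lower = opt_text.lower().strip()
--             if answer_lower == "yes" and opt_lower.startswith("yes"):
--                 return opt_value
--             if answer_lower == "no" and opt_lower.startswith("no"):
--                 return opt_value
--
--     return None
-- ===== SOURCE B (Python) =====
-- def _best_option_match(answer: str, options: list[str]) -> str | None:
--     """Single pass: rank each option (0 exact, 1 substring, 2 yes/no keyword), keep the best."""
--     if not answer or not options:
--         return None
--     answer_lower = answer.lower().strip()
--     best_rank = 3
--     best_value = None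
--     for opt_text, opt_value in options:
--         opt_lower = opt_text.lower().strip()
--         if answer_lower == opt_lower:
--             rank = 0
--         elif answer_lower in opt_lower or opt_lower in answer_lower:
--             rank = 1
--         elif answer_lower in ("yes", "no") and opt_lower.startswith(answer_lower):
--             rank = 2
--         else:
--             rank = 3
--         if rank < best_rank:
--             best_rank = rank
--             best_value = opt_value
--     return best_value
-- ===== Notes on version B (the rewrite author's own statement) =====
-- stated objective: alternative
-- what changed: Replaced A's three sequential full passes (exact, substring, yes/no keyword) by a single pass that ranks every option (0/1/2) and keeps the earliest option with the strictly lowest rank.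
import Mathlib
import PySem

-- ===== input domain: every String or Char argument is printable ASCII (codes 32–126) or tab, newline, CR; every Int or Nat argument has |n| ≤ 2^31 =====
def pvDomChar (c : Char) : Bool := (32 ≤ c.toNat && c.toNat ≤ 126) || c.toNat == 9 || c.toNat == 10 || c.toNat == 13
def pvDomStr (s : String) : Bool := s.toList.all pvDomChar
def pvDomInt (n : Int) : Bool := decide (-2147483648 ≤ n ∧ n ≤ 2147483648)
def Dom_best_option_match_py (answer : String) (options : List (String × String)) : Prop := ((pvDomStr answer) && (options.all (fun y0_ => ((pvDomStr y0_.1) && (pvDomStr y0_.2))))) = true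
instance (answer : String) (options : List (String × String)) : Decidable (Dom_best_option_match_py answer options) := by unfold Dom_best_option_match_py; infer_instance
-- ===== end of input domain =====

set_option maxHeartbeats 1000000

-- B replaces A's three sequential full passes by a single ranked pass (alternative decomposition, same cost).

-- ===== PORT A =====
-- the '# Exact match' loop
def pvFindExact (al : String) : List (String × String) → Option String
  | [] => none
  | (t, v) :: rest =>
    if al == PySem.Str.strip (PySem.Str.lower t) then some v else pvFindExact al rest

-- the '# Substring match' loop
def pvFindSub (al : String) : List (String × String) → Option String
  | [] => none
  | (t, v) :: rest =>
    let ol := PySem.Str.strip (PySem.Str.lower t)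
    if PySem.Str.isIn al ol || PySem.Str.isIn ol al then some v else pvFindSub al rest

-- the '# Keyword match for Yes/No answers' loop
def pvFindKw (al : String) : List (String × String) → Option String
  | [] => none
  | (t, v) :: rest =>
    let ol := PySem.Str.strip (PySem.Str.lower t)
    if al == "yes" && PySem.Str.startswith ol "yes" then some v
    else if al == "no" && PySem.Str.startswith ol "no" then some v
    else pvFindKw al rest

-- A's body after 'answer_lower = answer.lower().strip()': the three passes in order
def pvChain (al : String) (options : List (String × String)) : Option String :=
  match pvFindExact al options with
  | some v => some v
  | none =>
    match pvFindSub al options with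
    | some v => some v
    | none =>
      if al == "yes" || al == "no" then pvFindKw al options else none

def best_option_match_py (answer : String) (options : List (String × String)) : Option String :=
  if answer = "" ∨ options = [] then none
  else pvChain (PySem.Str.strip (PySem.Str.lower answer)) options

-- ===== PORT B =====
-- rank of one option: 0 exact, 1 substring, 2 yes/no keyword, 3 no match
def pvRank (al t : String) : Nat :=
  let ol := PySem.Str.strip (PySem.Str.lower t)
  if al == ol then 0
  else if PySem.Str.isIn al ol || PySem.Str.isIn ol al then 1
  else if (al == "yes" || al == "no") && PySem.Str.startswith ol al then 2
  else 3

-- B's loop body: update the state (best_rank, best_value) on a strictly smaller rank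
def pvStep (al : String) (st : Nat × Option String) (p : String × String) : Nat × Option String :=
  let r := pvRank al p.1
  if r < st.1 then (r, some p.2) else st

-- B's single loop
def pvScan (al : String) (options : List (String × String)) : Option String :=
  (options.foldl (pvStep al) (3, none)).2

def best_option_match_py_alt (answer : String) (options : List (String × String)) : Option String :=
  if answer = "" ∨ options = [] then none
  else pvScan (PySem.Str.strip (PySem.Str.lower answer)) options

-- ===== PRECONDITION & SPEC =====
def Spec_best_option_match_py (answer : String) (options : List (String × String)) (out : Option String) : Prop := out = best_option_match_py_alt answer options
instance (answer : String) (options : List (String × String)) (out : Option String) : Decidable (Spec_best_option_match_py answer options out) := by unfold Spec_best_option_match_py; infer_instance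

-- ===== CLAIM (what is proved, stated in full; the proofs are below) =====
def Claim_equal_best_option_match_py : Prop := ∀ (answer : String) (options : List (String × String)), Dom_best_option_match_py answer options → Spec_best_option_match_py answer options (best_option_match_py answer options)

-- ===== LEMMAS AND PROOFS =====

-- earliest option of minimal rank, as (rank, value); the common characterisation of both ports
def pvBest (al : String) : List (String × String) → Option (Nat × String)
  | [] => none
  | (t, v) :: rest =>
    match pvBest al rest with
    | none => if pvRank al t < 3 then some (pvRank al t, v) else none
    | some (br, bv) => if pvRank al t ≤ br then some (pvRank al t, v) else some (br, bv)

theorem pvBest_cons_none (al t v : String) (rest : List (String × String))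
    (h : pvBest al rest = none) :
    pvBest al ((t, v) :: rest) =
      if pvRank al t < 3 then some (pvRank al t, v) else none := by
  rw [pvBest, h]

theorem pvBest_cons_some (al t v : String) (rest : List (String × String)) (br : Nat) (bv : String)
    (h : pvBest al rest = some (br, bv)) :
    pvBest al ((t, v) :: rest) =
      if pvRank al t ≤ br then some (pvRank al t, v) else some (br, bv) := by
  rw [pvBest, h]

theorem pvIsIn_of_startswith (al ol : String) (h : PySem.Str.startswith ol al = true) :
    PySem.Str.isIn al ol = true := by
  rw [PySem.Str.isIn_eq, PySem.Chars.isIn_iff_infix]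
  rw [PySem.Str.startswith_eq] at h
  exact ((PySem.Chars.startswith_iff _ _).mp h).isInfix

theorem pvIsIn_refl (s : String) : PySem.Str.isIn s s = true := by
  rw [PySem.Str.isIn_eq, PySem.Chars.isIn_iff_infix]

theorem pvRank_le_three (al t : String) : pvRank al t ≤ 3 := by
  unfold pvRank; dsimp only; split_ifs <;> omega

theorem pvRank_ne_two (al t : String) : pvRank al t ≠ 2 := by
  unfold pvRank; dsimp only
  split_ifs with h1 h2 h3 <;> try omega
  exfalso
  have hsw : PySem.Str.startswith (PySem.Str.strip (PySem.Str.lower t)) al = true :=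
    (Bool.and_eq_true _ _ ▸ h3).2
  rw [pvIsIn_of_startswith al _ hsw] at h2
  simp at h2

theorem pvBest_rank_lt (al : String) (L : List (String × String)) (r : Nat) (v : String)
    (h : pvBest al L = some (r, v)) : r < 3 ∧ r ≠ 2 := by
  induction L generalizing r v with
  | nil => simp [pvBest] at h
  | cons p rest ih =>
    obtain ⟨t, w⟩ := p
    revert h
    cases hr : pvBest al rest with
    | none =>
      intro h
      rw [pvBest_cons_none al t w rest hr] at h
      by_cases h1 : pvRank al t < 3
      · rw [if_pos h1] at h
        have hfst : pvRank al t = r := by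
          have := congrArg (fun o => (o.getD (0, "")).1) h
          simpa using this
        rw [← hfst]
        exact ⟨h1, pvRank_ne_two al t⟩
      · rw [if_neg h1] at h
        exact absurd h.symm (Option.some_ne_none (r, v))
    | some q =>
      obtain ⟨br, bv⟩ := q
      intro h
      rw [pvBest_cons_some al t w rest br bv hr] at h
      have hb := ih br bv hr
      by_cases h1 : pvRank al t ≤ br
      · rw [if_pos h1] at h
        have hfst : pvRank al t = r := by
          have := congrArg (fun o => (o.getD (0, "")).1) h
          simpa using this
        rw [← hfst]
        exact ⟨by omega, pvRank_ne_two al t⟩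
      · rw [if_neg h1] at h
        have hfst : br = r := by
          have := congrArg (fun o => (o.getD (0, "")).1) h
          simpa using this
        rw [← hfst]
        exact hb

theorem pvRank_eq_zero_iff (al t : String) :
    pvRank al t = 0 ↔ (al == PySem.Str.strip (PySem.Str.lower t)) = true := by
  unfold pvRank; dsimp only; split_ifs with h1 h2 h3 <;> simp [h1]

theorem pvRank_le_one_iff (al t : String) :
    pvRank al t ≤ 1 ↔ (PySem.Str.isIn al (PySem.Str.strip (PySem.Str.lower t)) ||
                       PySem.Str.isIn (PySem.Str.strip (PySem.Str.lower t)) al) = true := by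
  unfold pvRank; dsimp only
  split_ifs with h1 h2 h3
  · refine ⟨fun _ => ?_, fun _ => by omega⟩
    have he : al = PySem.Str.strip (PySem.Str.lower t) := eq_of_beq h1
    rw [← he, pvIsIn_refl al]
    rfl
  · exact ⟨fun _ => h2, fun _ => Nat.le_refl 1⟩
  · exact ⟨fun h => absurd h (by omega), fun hc => absurd hc h2⟩
  · exact ⟨fun h => absurd h (by omega), fun hc => absurd hc h2⟩

theorem findExact_eq (al : String) (L : List (String × String)) :
    pvFindExact al L = (pvBest al L).bind (fun p => if p.1 = 0 then some p.2 else none) := by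
  induction L with
  | nil => simp [pvFindExact, pvBest]
  | cons p rest ih =>
    obtain ⟨t, w⟩ := p
    cases hb : pvBest al rest with
    | none =>
      rw [pvFindExact, ih, hb, pvBest_cons_none al t w rest hb]
      by_cases h0 : pvRank al t = 0
      · rw [if_pos ((pvRank_eq_zero_iff al t).mp h0)]
        simp [h0]
      · rw [if_neg (fun hc => h0 ((pvRank_eq_zero_iff al t).mpr hc))]
        split_ifs with h1 <;> simp [h0]
    | some q =>
      obtain ⟨br, bv⟩ := q
      rw [pvFindExact, ih, hb, pvBest_cons_some al t w rest br bv hb]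
      by_cases h0 : pvRank al t = 0
      · rw [if_pos ((pvRank_eq_zero_iff al t).mp h0)]
        rw [if_pos (by omega : pvRank al t ≤ br)]
        simp [h0]
      · rw [if_neg (fun hc => h0 ((pvRank_eq_zero_iff al t).mpr hc))]
        by_cases h1 : pvRank al t ≤ br
        · rw [if_pos h1]
          have hne : br ≠ 0 := by omega
          simp [h0, hne]
        · rw [if_neg h1]

theorem findSub_eq (al : String) (L : List (String × String))
    (hE : pvFindExact al L = none) :
    pvFindSub al L = (pvBest al L).bind (fun p => if p.1 = 1 then some p.2 else none) := by
  induction L with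
  | nil => simp [pvFindSub, pvBest]
  | cons p rest ih =>
    obtain ⟨t, w⟩ := p
    rw [pvFindExact] at hE
    have h0 : pvRank al t ≠ 0 := by
      intro hc
      rw [if_pos ((pvRank_eq_zero_iff al t).mp hc)] at hE
      exact absurd hE (Option.some_ne_none w)
    rw [if_neg (fun hc => h0 ((pvRank_eq_zero_iff al t).mpr hc))] at hE
    by_cases h1 : pvRank al t ≤ 1
    · have hs := (pvRank_le_one_iff al t).mp h1
      have hr1 : pvRank al t = 1 := by omega
      cases hb : pvBest al rest with
      | none =>
        rw [pvFindSub, if_pos hs, pvBest_cons_none al t w rest hb, hr1]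
        simp
      | some q =>
        obtain ⟨br, bv⟩ := q
        have hbr0 : br ≠ 0 := by
          intro hc; subst hc
          rw [findExact_eq, hb] at hE
          simp at hE
        rw [pvFindSub, if_pos hs, pvBest_cons_some al t w rest br bv hb, hr1]
        rw [if_pos (by omega : 1 ≤ br)]
        simp
    · have hs : ¬ (PySem.Str.isIn al (PySem.Str.strip (PySem.Str.lower t)) ||
                   PySem.Str.isIn (PySem.Str.strip (PySem.Str.lower t)) al) = true :=
        fun hc => h1 ((pvRank_le_one_iff al t).mpr hc)
      have hr3 : pvRank al t = 3 := by
        have := pvRank_le_three al t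
        have := pvRank_ne_two al t
        omega
      cases hb : pvBest al rest with
      | none =>
        rw [pvFindSub, if_neg hs, ih hE, hb, pvBest_cons_none al t w rest hb, hr3]
        simp
      | some q =>
        obtain ⟨br, bv⟩ := q
        have hbr := (pvBest_rank_lt al rest br bv hb).1
        rw [pvFindSub, if_neg hs, ih hE, hb, pvBest_cons_some al t w rest br bv hb, hr3]
        rw [if_neg (by omega : ¬ 3 ≤ br)]

theorem findKw_eq_none (al : String) (L : List (String × String))
    (hS : pvFindSub al L = none) : pvFindKw al L = none := by
  induction L with
  | nil => simp [pvFindKw]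
  | cons p rest ih =>
    obtain ⟨t, w⟩ := p
    rw [pvFindSub] at hS
    by_cases hs : (PySem.Str.isIn al (PySem.Str.strip (PySem.Str.lower t)) ||
                   PySem.Str.isIn (PySem.Str.strip (PySem.Str.lower t)) al) = true
    · rw [if_pos hs] at hS; exact absurd hS (Option.some_ne_none w)
    · rw [if_neg hs] at hS
      have hno : ∀ (kw : String), al = kw →
          PySem.Chars.startswith (PySem.Chars.strip (PySem.Chars.lower t.toList)) kw.toList = false := by
        intro kw hkw
        subst hkw
        cases hb : PySem.Chars.startswith (PySem.Chars.strip (PySem.Chars.lower t.toList)) al.toList with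
        | false => rfl
        | true =>
          exfalso
          apply hs
          have hb' : PySem.Str.startswith (PySem.Str.strip (PySem.Str.lower t)) al = true := by
            rw [PySem.Str.startswith_eq]
            simpa using hb
          rw [pvIsIn_of_startswith al _ hb']
          rfl
      rw [pvFindKw]
      by_cases hy : al = "yes"
      · rw [if_neg (by intro hc
                       have h1 := (Bool.and_eq_true _ _ ▸ hc).2
                       have h2 := hno "yes" hy
                       simp at h1
                       rw [show ("yes" : String).toList = ['y','e','s'] from rfl] at h2
                       exact absurd h1 (by simp [h2]))]
        rw [if_neg (by simp [hy])]
        exact ih hS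
      · by_cases hn : al = "no"
        · rw [if_neg (by simp [hy])]
          rw [if_neg (by intro hc
                         have h1 := (Bool.and_eq_true _ _ ▸ hc).2
                         have h2 := hno "no" hn
                         simp at h1
                         rw [show ("no" : String).toList = ['n','o'] from rfl] at h2
                         exact absurd h1 (by simp [h2]))]
          exact ih hS
        · rw [if_neg (by simp [hy]), if_neg (by simp [hn])]
          exact ih hS

def pvMerge (st : Nat × Option String) : Option (Nat × String) → Nat × Option String
  | none => st
  | some (r, v) => if r < st.1 then (r, some v) else st

theorem pvMerge_none (st : Nat × Option String) : pvMerge st none = st := rfl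
theorem pvMerge_some (st : Nat × Option String) (r : Nat) (v : String) :
    pvMerge st (some (r, v)) = if r < st.1 then (r, some v) else st := rfl

theorem pvStep_eq (al : String) (st : Nat × Option String) (t w : String) :
    pvStep al st (t, w) = if pvRank al t < st.1 then (pvRank al t, some w) else st := rfl

-- pvBest's cons step with the rank abstracted out
def pvCombine (r : Nat) (v : String) : Option (Nat × String) → Option (Nat × String)
  | none => if r < 3 then some (r, v) else none
  | some (br, bv) => if r ≤ br then some (r, v) else some (br, bv)

theorem pvBest_cons_eq (al t v : String) (rest : List (String × String)) :
    pvBest al ((t, v) :: rest) = pvCombine (pvRank al t) v (pvBest al rest) := by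
  cases hb : pvBest al rest with
  | none => rw [pvBest_cons_none al t v rest hb]; rfl
  | some q => obtain ⟨br, bv⟩ := q; rw [pvBest_cons_some al t v rest br bv hb]; rfl

-- the pure arithmetic heart of the fold invariant: merging after the step = stepping then merging
theorem pvMerge_pair (a : Nat) (o : Option String) (r : Nat) (v : String) :
    pvMerge (a, o) (some (r, v)) = if r < a then (r, some v) else (a, o) := rfl

theorem pvMerge_combine (r : Nat) (w : String) (st : Nat × Option String) (b : Option (Nat × String))
    (hst : st.1 ≤ 3) (hr : r ≤ 3) (hb : ∀ p, b = some p → p.1 < 3) :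
    pvMerge st (pvCombine r w b) = pvMerge (if r < st.1 then (r, some w) else st) b := by
  cases b with
  | none =>
    by_cases hlt : r < st.1
    · rw [if_pos hlt, pvCombine, if_pos (by omega : r < 3), pvMerge_some, if_pos hlt, pvMerge_none]
    · rw [if_neg hlt, pvCombine]
      by_cases h3 : r < 3
      · rw [if_pos h3, pvMerge_some, if_neg hlt, pvMerge_none]
      · rw [if_neg h3, pvMerge_none]
  | some q =>
    obtain ⟨br, bv⟩ := q
    have hbr : br < 3 := hb (br, bv) rfl
    by_cases hlt : r < st.1
    · rw [if_pos hlt]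
      by_cases hle : r ≤ br
      · rw [pvCombine, if_pos hle, pvMerge_some, if_pos hlt, pvMerge_pair,
            if_neg (by omega : ¬ br < r)]
      · rw [pvCombine, if_neg hle, pvMerge_some, if_pos (by omega : br < st.1), pvMerge_pair,
            if_pos (by omega : br < r)]
    · rw [if_neg hlt]
      by_cases hle : r ≤ br
      · rw [pvCombine, if_pos hle, pvMerge_some, if_neg hlt, pvMerge_some,
            if_neg (by omega : ¬ br < st.1)]
      · rw [pvCombine, if_neg hle]

theorem foldl_eq_pvBest (al : String) (L : List (String × String)) :
    ∀ (st : Nat × Option String), st.1 ≤ 3 →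
    L.foldl (pvStep al) st = pvMerge st (pvBest al L) := by
  induction L with
  | nil => intro st _; rfl
  | cons p rest ih =>
    intro st hst
    obtain ⟨t, w⟩ := p
    have hr3 := pvRank_le_three al t
    rw [List.foldl_cons, pvStep_eq al st t w]
    rw [ih (if pvRank al t < st.1 then (pvRank al t, some w) else st)
          (by split_ifs <;> omega)]
    rw [pvBest_cons_eq al t w rest]
    exact (pvMerge_combine (pvRank al t) w st (pvBest al rest) hst hr3
      (fun p hp => (pvBest_rank_lt al rest p.1 p.2 (by rw [hp])).1)).symm

theorem pvScan_eq (al : String) (L : List (String × String)) :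
    pvScan al L = (pvBest al L).map (·.2) := by
  unfold pvScan
  rw [foldl_eq_pvBest al L (3, none) (by norm_num)]
  cases hb : pvBest al L with
  | none => rfl
  | some q =>
    obtain ⟨br, bv⟩ := q
    have hbr := (pvBest_rank_lt al L br bv hb).1
    rw [pvMerge_some, if_pos (by simpa using hbr)]
    rfl

theorem pvChain_eq_pvScan (al : String) (L : List (String × String)) :
    pvChain al L = pvScan al L := by
  rw [pvScan_eq]
  cases hb : pvBest al L with
  | none =>
    have hE : pvFindExact al L = none := by rw [findExact_eq, hb]; rfl
    have hS : pvFindSub al L = none := by rw [findSub_eq al L hE, hb]; rfl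
    have hK := findKw_eq_none al L hS
    unfold pvChain
    rw [hE, hS]
    by_cases hy : (al == "yes" || al == "no") = true
    · rw [if_pos hy, hK]
      all_goals rfl
    · rw [if_neg hy]
      all_goals rfl
  | some q =>
    obtain ⟨br, bv⟩ := q
    have hbr := pvBest_rank_lt al L br bv hb
    have : br = 0 ∨ br = 1 := by omega
    rcases this with h0 | h1
    · subst h0
      have hE : pvFindExact al L = some bv := by rw [findExact_eq, hb]; rfl
      unfold pvChain
      rw [hE]
      all_goals rfl
    · subst h1
      have hE : pvFindExact al L = none := by rw [findExact_eq, hb]; rfl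
      have hS : pvFindSub al L = some bv := by rw [findSub_eq al L hE, hb]; rfl
      unfold pvChain
      rw [hE, hS]
      all_goals rfl

-- ===== VERDICT (by name: the statement is the Claim_ definition above) =====
theorem best_option_match_py_spec : Claim_equal_best_option_match_py := by
  intro answer options _
  unfold Spec_best_option_match_py best_option_match_py best_option_match_py_alt
  by_cases hg : answer = "" ∨ options = []
  · rw [if_pos hg, if_pos hg]
  · rw [if_neg hg, if_neg hg]
    exact pvChain_eq_pvScan _ options
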